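-- pv_equiv track=rewrite | github.com/NoMoneyDev/final_project | project_manage.py | fit_text_to_screen
-- ===== SOURCE A (Python) =====
-- def fit_text_to_screen(txt):
--     '''
--     turn word spaghetti into string that cut to new line every 10 word
--     :param txt: txt to convert
--     :return: string that cut to new line every 10 word
--     '''
--     txt = txt.split()
--     new_txt = ''
--     while len(txt) != 0:
--         if len(txt) < 10:
--             new_txt += ' '.join(txt[:len(txt)])
--             txt = []
--         else:
--             new_txt += ' '.join(txt[:10])
--             txt = txt[10:]
--         new_txt += '\n'
--     return new_txt
-- ===== SOURCE B (Python) =====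
-- def fit_text_to_screen(txt):
--     words = txt.split()
--     chunks = [' '.join(words[i:i + 10]) for i in range(0, len(words), 10)]
--     return ''.join(c + '\n' for c in chunks)
-- ===== Notes on version B (the rewrite author's own statement) =====
-- stated objective: simpler
-- what changed: Replaces A's destructive while-loop that repeatedly slices the word list and special-cases the short tail with a single indexed pass: chunks are computed up front as words[i:i+10] for i in range(0, len(words), 10) and joined with a trailing newline each, no tail branch.
import Mathlib
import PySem

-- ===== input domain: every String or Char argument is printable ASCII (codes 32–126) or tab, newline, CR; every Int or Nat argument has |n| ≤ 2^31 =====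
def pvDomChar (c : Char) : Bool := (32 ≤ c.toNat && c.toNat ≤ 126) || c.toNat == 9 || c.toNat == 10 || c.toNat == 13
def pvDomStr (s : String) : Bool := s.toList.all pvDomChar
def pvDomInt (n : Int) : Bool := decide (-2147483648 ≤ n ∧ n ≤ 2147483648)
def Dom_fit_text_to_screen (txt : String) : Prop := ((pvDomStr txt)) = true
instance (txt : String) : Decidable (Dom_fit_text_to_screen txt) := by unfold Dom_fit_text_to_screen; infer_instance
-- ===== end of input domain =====

-- B wraps words 10-per-line exactly like A, but computes the line chunks with a single
-- indexed pass (words[i:i+10] for i in range(0, len(words), 10)) instead of A's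
-- destructive while-slicing with a special-cased short tail; objective: simpler.

-- ===== PORT A =====
-- while len(txt) != 0: append ' '.join of the first 10 (or all, if fewer) words plus '\n', drop them
def fitA_loop (ws : List String) (acc : String) : String :=
  if _h : ws.length = 0 then acc
  else if ws.length < 10 then
    -- new_txt += ' '.join(txt[:len(txt)]); txt = []  (so the loop ends); new_txt += '\n'
    acc ++ PySem.Str.join " " (PySem.List.slice ws none (some (ws.length : Int))) ++ "\n"
  else
    -- new_txt += ' '.join(txt[:10]); txt = txt[10:]; new_txt += '\n'
    fitA_loop (PySem.List.slice ws (some 10) none)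
      (acc ++ PySem.Str.join " " (PySem.List.slice ws none (some 10)) ++ "\n")
  termination_by ws.length
  decreasing_by
    simp [PySem.List.slice_from (xs := ws) (a := 10) (by norm_num)]
    omega

def fit_text_to_screen (txt : String) : String :=
  fitA_loop (PySem.Str.split₀ txt) ""

-- ===== PORT B =====
-- chunks = [' '.join(words[i:i + 10]) for i in range(0, len(words), 10)]
def fitB_chunks (words : List String) : List String :=
  (PySem.List.pyRange 0 (words.length : Int) 10).map
    (fun i => PySem.Str.join " " (PySem.List.slice words (some i) (some (i + 10))))

-- return ''.join(c + '\n' for c in chunks)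
def fit_text_to_screen_alt (txt : String) : String :=
  let words := PySem.Str.split₀ txt
  PySem.Str.join "" ((fitB_chunks words).map (fun c => c ++ "\n"))

-- ===== PRECONDITION & SPEC =====
def Spec_fit_text_to_screen (txt : String) (out : String) : Prop := out = fit_text_to_screen_alt txt
instance (txt : String) (out : String) : Decidable (Spec_fit_text_to_screen txt out) := by unfold Spec_fit_text_to_screen; infer_instance

-- ===== CLAIM (what is proved, stated in full; the proofs are below) =====
def Claim_equal_fit_text_to_screen : Prop := ∀ (txt : String), Dom_fit_text_to_screen txt → Spec_fit_text_to_screen txt (fit_text_to_screen txt)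

-- ===== LEMMAS AND PROOFS =====

-- ''.join on an empty list of parts
lemma str_join_empty_nil : PySem.Str.join "" ([] : List String) = "" := by
  rw [← String.toList_inj]
  simp [PySem.Str.toList_join, PySem.Chars.join, List.intercalate]

-- ''.join concatenates head and tail
lemma str_join_empty_cons (c : String) (l : List String) :
    PySem.Str.join "" (c :: l) = c ++ PySem.Str.join "" l := by
  rw [← String.toList_inj]
  cases l with
  | nil => simp [PySem.Str.toList_join, PySem.Chars.join, List.intercalate]
  | cons d l => simp [PySem.Str.toList_join, PySem.Chars.join_cons_cons]

-- the slice ws[10*k : 10*k+10] as drop/take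
lemma slice10 {α : Type} (ws : List α) (k : Nat) :
    PySem.List.slice ws (some (0 + 10 * (k : Int))) (some (0 + 10 * (k : Int) + 10))
      = (ws.drop (10 * k)).take 10 := by
  have e2 : (0 + 10 * (k : Int) + 10) = ((10 * k + 10 : Nat) : Int) := by push_cast; ring
  have e1 : (0 + 10 * (k : Int)) = ((10 * k : Nat) : Int) := by push_cast; ring
  rw [e2, e1, PySem.List.slice_natCast]
  congr 1
  omega

lemma fitB_chunks_nil : fitB_chunks [] = [] := by
  simp [fitB_chunks, PySem.List.pyRange_of_pos 0 0 (by norm_num : (0:Int) < 10)]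

-- fewer than 10 words: a single chunk holding all of them
lemma fitB_chunks_short (ws : List String) (h0 : ws.length ≠ 0) (h : ws.length < 10) :
    fitB_chunks ws = [PySem.Str.join " " ws] := by
  rw [fitB_chunks, PySem.List.pyRange_of_pos 0 (ws.length : Int) (by norm_num : (0:Int) < 10)]
  have h1 : (if (0:Int) < (ws.length:Int) then ((((ws.length:Int)) - 0 + 10 - 1) / 10).toNat else 0) = 1 := by
    rw [if_pos (by exact_mod_cast Nat.pos_of_ne_zero h0)]
    omega
  rw [h1]
  simp only [List.range_one, List.map_cons, List.map_nil]
  rw [PySem.List.slice_toNat ws (by norm_num) (by norm_num)]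
  norm_num
  rw [show Int.toNat 10 = 10 from rfl, List.take_of_length_le (by omega : ws.length ≤ 10)]

-- at least 10 words: the first chunk splits off and the rest are the chunks of the remainder
lemma fitB_chunks_long (ws : List String) (h : 10 ≤ ws.length) :
    fitB_chunks ws = PySem.Str.join " " (ws.take 10) :: fitB_chunks (ws.drop 10) := by
  rw [fitB_chunks, fitB_chunks,
    PySem.List.pyRange_of_pos 0 (ws.length : Int) (by norm_num : (0:Int) < 10),
    PySem.List.pyRange_of_pos 0 ((ws.drop 10).length : Int) (by norm_num : (0:Int) < 10)]
  have h1 : (if (0:Int) < (ws.length:Int) then ((((ws.length:Int)) - 0 + 10 - 1) / 10).toNat else 0)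
      = (if (0:Int) < ((ws.drop 10).length:Int) then (((((ws.drop 10).length:Int)) - 0 + 10 - 1) / 10).toNat else 0) + 1 := by
    rw [if_pos (by exact_mod_cast Nat.lt_of_lt_of_le (by norm_num) h)]
    simp only [List.length_drop]
    split_ifs with h2
    · omega
    · have h3 : ws.length = 10 := by
        push_cast at h2; omega
      rw [h3]; norm_num
  rw [h1, List.range_succ_eq_map]
  simp only [List.map_cons, List.map_map]
  congr 1
  · rw [PySem.List.slice_toNat ws (by norm_num) (by norm_num)]
    norm_num
    rw [show Int.toNat 10 = 10 from rfl]
  · apply List.map_congr_left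
    intro k _
    simp only [Function.comp]
    rw [slice10, slice10, List.drop_drop]
    rw [show 10 * k.succ = 10 + 10 * k by omega]

-- A's loop produces acc followed by B's chunks each with a trailing newline
lemma fitA_loop_eq (n : Nat) : ∀ (ws : List String), ws.length = n → ∀ (acc : String),
    fitA_loop ws acc = acc ++ PySem.Str.join "" ((fitB_chunks ws).map (fun c => c ++ "\n")) := by
  induction n using Nat.strong_induction_on with
  | _ n ih =>
    intro ws hn acc
    rw [fitA_loop]
    by_cases h0 : ws.length = 0
    · rw [dif_pos h0]
      obtain rfl : ws = [] := List.eq_nil_of_length_eq_zero h0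
      rw [fitB_chunks_nil]
      simp [str_join_empty_nil]
    · rw [dif_neg h0]
      by_cases h10 : ws.length < 10
      · rw [if_pos h10, fitB_chunks_short ws h0 h10, List.map_cons, List.map_nil,
           str_join_empty_cons, str_join_empty_nil]
        simp only [PySem.List.slice_to (xs := ws) (b := (ws.length : Int)) (by positivity)]
        rw [show (ws.length : Int).toNat = ws.length from by omega, List.take_length]
        simp [String.append_assoc]
      · rw [if_neg h10]
        simp only [PySem.List.slice_from (xs := ws) (a := 10) (by norm_num : (0:Int) ≤ 10),
          PySem.List.slice_to (xs := ws) (b := 10) (by norm_num : (0:Int) ≤ 10),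
          show Int.toNat 10 = 10 from rfl]
        rw [ih (n - 10) (by omega) _ (by simp; omega)]
        rw [fitB_chunks_long ws (by omega), List.map_cons, str_join_empty_cons]
        simp [String.append_assoc]

-- ===== VERDICT (by name: the statement is the Claim_ definition above) =====
theorem fit_text_to_screen_spec : Claim_equal_fit_text_to_screen := by
  intro txt _
  unfold Spec_fit_text_to_screen
  simp only [fit_text_to_screen, fit_text_to_screen_alt]
  rw [fitA_loop_eq _ (PySem.Str.split₀ txt) rfl ""]
  simp
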